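-- pv_equiv track=rewrite | github.com/MLOliverB/Advent_Of_Code | 2020/day_6/Day_6_Part_2.py | process_answers
-- ===== SOURCE A (Python) =====
-- def process_answers(answers):
--     yes_answers = []
--     people_answers = answers.split(" ")
--     for c in people_answers[0]:
--         includes = True
--         for answers in people_answers:
--             if c not in answers:
--                 includes = False
--         if includes:
--             yes_answers.append(c)
--     return len(yes_answers)
-- ===== SOURCE B (Python) =====
-- def process_answers(answers):
--     people = answers.split(" ")
--     n = len(people)
--     counter = {}
--     for person in people:
--         for c in set(person):
--             counter[c] = counter.get(c, 0) + 1
--     return sum(1 for c in people[0] if counter.get(c, 0) == n)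
-- ===== Notes on version B (the rewrite author's own statement) =====
-- stated objective: alternative
-- what changed: Instead of rescanning every person's string for each character of the first person (nested membership loops), B builds a per-character frequency dict in one pass over all people (counting each person once via set(person)) and then does a single threshold pass over the first person's characters.
import Mathlib
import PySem

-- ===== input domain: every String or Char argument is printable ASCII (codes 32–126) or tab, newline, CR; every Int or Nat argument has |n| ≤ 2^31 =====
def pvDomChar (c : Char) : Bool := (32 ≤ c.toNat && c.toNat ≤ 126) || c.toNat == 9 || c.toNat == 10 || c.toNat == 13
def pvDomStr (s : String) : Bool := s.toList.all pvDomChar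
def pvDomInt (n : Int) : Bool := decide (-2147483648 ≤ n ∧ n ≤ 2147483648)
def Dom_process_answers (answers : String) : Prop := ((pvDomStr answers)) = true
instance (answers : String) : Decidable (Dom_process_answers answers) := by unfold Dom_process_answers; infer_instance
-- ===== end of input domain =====

-- B replaces A's rescan of every person for every char of the first person by a per-char
-- frequency index built in one pass, then a single threshold pass over the first person (objective: alternative algorithm).

-- ===== PORT A =====
def process_answers (answers : String) : Int :=
  let people := PySem.Chars.splitOn answers.toList [' ']
  let first := PySem.List.pyGetD people 0 []
  let yes := first.foldl (fun acc c =>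
    let includes := people.foldl (fun inc p =>
      if !(PySem.Chars.isIn [c] p) then false else inc) true
    if includes then acc ++ [c] else acc) ([] : List Char)
  (yes.length : Int)

-- ===== PORT B =====
def process_answers_alt (answers : String) : Int :=
  let people := PySem.Chars.splitOn answers.toList [' ']
  let n := people.length
  let counter := people.foldl (fun d p =>
      (PySem.Set.ofList p).foldl (fun d c => d.insert c (d.getD c 0 + 1)) d)
    (PySem.Dict.empty : PySem.Dict Char Int)
  (PySem.List.pyGetD people 0 []).foldl
    (fun s c => if counter.getD c 0 = (n : Int) then s + 1 else s) (0 : Int)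

-- ===== PRECONDITION & SPEC =====
def Spec_process_answers (answers : String) (out : Int) : Prop := out = process_answers_alt answers
instance (answers : String) (out : Int) : Decidable (Spec_process_answers answers out) := by unfold Spec_process_answers; infer_instance

-- ===== CLAIM (what is proved, stated in full; the proofs are below) =====
def Claim_equal_process_answers : Prop := ∀ (answers : String), Dom_process_answers answers → Spec_process_answers answers (process_answers answers)

-- ===== LEMMAS AND PROOFS =====

-- B's counter, read at c, counts the people containing c (each person once).
theorem pv_counter_getD (people : List (List Char)) (d : PySem.Dict Char Int) (c : Char) :
    (people.foldl (fun d p =>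
      (PySem.Set.ofList p).foldl (fun d c => d.insert c (d.getD c 0 + 1)) d) d).getD c 0
    = d.getD c 0 + (people.countP (fun p => decide (c ∈ p)) : Int) := by
  induction people generalizing d with
  | nil => simp
  | cons p rest ih =>
    rw [List.foldl_cons, ih, PySem.Dict.getD_foldl_insert_add_one, List.countP_cons]
    by_cases h : c ∈ p
    · rw [List.count_eq_one_of_mem (PySem.Set.nodup_ofList p) ((PySem.Set.mem_ofList p c).mpr h)]
      simp [h]; ring
    · rw [List.count_eq_zero_of_not_mem (fun hm => h ((PySem.Set.mem_ofList p c).mp hm))]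
      simp [h]

-- A's membership test on a one-char string is list membership.
theorem pv_isIn_singleton (c : Char) (p : List Char) :
    PySem.Chars.isIn [c] p = decide (c ∈ p) := by
  by_cases h : c ∈ p
  · simp [h, (PySem.Chars.isIn_iff_infix [c] p).mpr ((List.singleton_infix_iff c p).mpr h)]
  · simp only [h, decide_false]
    rw [PySem.Chars.isIn_eq_false_iff]
    exact fun hi => h ((List.singleton_infix_iff c p).mp hi)

-- ===== VERDICT (by name: the statement is the Claim_ definition above) =====
theorem process_answers_spec : Claim_equal_process_answers := by
  intro answers _
  unfold Spec_process_answers process_answers process_answers_alt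
  set people := PySem.Chars.splitOn answers.toList [' '] with hp
  simp only [PySem.List.foldl_if_false_eq, PySem.List.foldl_append_if_eq_filter,
    PySem.List.foldl_ite_add_one, List.nil_append, Bool.true_and, zero_add]
  rw [← List.countP_eq_length_filter]
  congr 1
  apply List.countP_congr
  intro c _
  rw [pv_counter_getD]
  simp only [PySem.Dict.getD_empty, zero_add]
  rw [Bool.eq_iff_iff]
  simp only [pv_isIn_singleton, Bool.not_eq_true', decide_eq_true_eq, Int.natCast_inj,
    List.countP_eq_length]
  simp
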